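-- pv_equiv track=rewrite | github.com/dedsec1121fk/DedSec | Scripts/Network Tools/Bug Hunter.py | _build_dirb_wordlist
-- ===== SOURCE A (Python) =====
-- from typing import Any, Deque, Dict, Iterable, List, Optional, Set, Tuple
--
-- DEFAULT_DIRB_EXTENSIONS = ["php", "html", "js", "json", "txt", "bak", "zip", "old", "asp", "aspx", "jsp"]
--
-- def _build_dirb_wordlist(
--
--     wordlist: List[str],
--     extensions: Optional[List[str]] = None,
--     force_extensions: bool = False,
-- ) -> List[str]:
--     """
--     Expand wordlist dirsearch-style:
--     - Entries containing %EXT% → one variant per extension replacing %EXT%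
--     - force_extensions=True  → append each extension to every bare word too
--     - Deduplicates and preserves order.
--     """
--     exts = extensions or DEFAULT_DIRB_EXTENSIONS
--     seen: Set[str] = set()
--     out: List[str] = []
--
--     def _add(p: str) -> None:
--         p = p.strip("/")
--         if p and p not in seen:
--             seen.add(p)
--             out.append(p)
--
--     for entry in wordlist:
--         entry = entry.strip()
--         if not entry or entry.startswith("#"):
--             continue
--
--         if "%EXT%" in entry:
--             # Replace %EXT% with each extension
--             for ext in exts:
--                 _add(entry.replace("%EXT%", ext))
--         else:
--             _add(entry)
--             if force_extensions and "." not in entry.split("/")[-1]: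
--                 for ext in exts:
--                     _add(f"{entry}.{ext}")
--
--     return out
-- ===== SOURCE B (Python) =====
-- DEFAULT_DIRB_EXTENSIONS = ["php", "html", "js", "json", "txt", "bak", "zip", "old", "asp", "aspx", "jsp"]
--
-- def _build_dirb_wordlist(wordlist, extensions=None, force_extensions=False):
--     # Phase 1: generate all raw candidates into a flat list.
--     exts = extensions or DEFAULT_DIRB_EXTENSIONS
--     cands = []
--     for raw in wordlist:
--         entry = raw.strip()
--         if not entry or entry.startswith("#"):
--             continue
--         if "%EXT%" in entry:
--             cands += [entry.replace("%EXT%", e) for e in exts]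
--         else:
--             cands.append(entry)
--             if force_extensions and "." not in entry.split("/")[-1]:
--                 cands += [f"{entry}.{e}" for e in exts]
--     # Phase 2: strip '/', drop empties, then deduplicate WITHOUT any seen-set:
--     # repeatedly emit the head and filter all of its copies out of the remainder.
--     pending = [s for s in (c.strip("/") for c in cands) if s]
--     out = []
--     while pending:
--         head = pending[0]
--         out.append(head)
--         pending = [x for x in pending[1:] if x != head]
--     return out
-- ===== Notes on version B (the rewrite author's own statement) =====
-- stated objective: alternative
-- what changed: B drops A's seen-set entirely: it first builds a flat candidate list, then deduplicates by a filter-nub loop that repeatedly emits the head and filters every copy of it out of the remaining candidates (no auxiliary set or dict at all).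
import Mathlib
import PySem

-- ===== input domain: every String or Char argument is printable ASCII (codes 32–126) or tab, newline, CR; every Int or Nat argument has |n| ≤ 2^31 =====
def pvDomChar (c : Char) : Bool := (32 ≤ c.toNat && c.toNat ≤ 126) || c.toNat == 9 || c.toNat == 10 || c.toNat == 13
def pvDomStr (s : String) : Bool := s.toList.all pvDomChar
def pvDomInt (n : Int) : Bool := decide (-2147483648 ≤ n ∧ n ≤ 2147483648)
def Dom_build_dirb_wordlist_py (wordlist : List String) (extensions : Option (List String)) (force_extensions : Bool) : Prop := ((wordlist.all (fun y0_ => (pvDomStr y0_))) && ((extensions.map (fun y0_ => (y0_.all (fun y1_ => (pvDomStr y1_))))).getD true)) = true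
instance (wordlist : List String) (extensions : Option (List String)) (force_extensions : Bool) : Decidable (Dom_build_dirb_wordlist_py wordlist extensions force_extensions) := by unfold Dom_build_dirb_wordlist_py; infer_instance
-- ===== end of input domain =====

-- B drops A's seen-set: it builds a flat candidate list, then deduplicates with a
-- filter-nub loop (emit the head, filter its copies out of the rest) — alternative algorithm, same results.

-- ===== PORT A =====
def pvDefaultExts : List String :=
  ["php", "html", "js", "json", "txt", "bak", "zip", "old", "asp", "aspx", "jsp"]

-- A's local `_add`: strip '/', skip empty or already-seen, else record in seen and append to out.
def pvAddA (st : PySem.Set String × List String) (p0 : String) : PySem.Set String × List String :=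
  let p := PySem.Str.stripChars p0 "/"
  if (p != "") && !(PySem.Set.contains st.1 p) then (PySem.Set.add st.1 p, st.2 ++ [p]) else st

def build_dirb_wordlist_py (wordlist : List String) (extensions : Option (List String)) (force_extensions : Bool) : List String :=
  let exts := match extensions with
    | some (e :: es) => e :: es   -- `extensions or DEFAULT`: None and [] both fall back
    | _ => pvDefaultExts
  (wordlist.foldl (fun st entry0 =>
      let entry := PySem.Str.strip entry0
      if (entry == "") || PySem.Str.startswith entry "#" then st
      else if PySem.Str.isIn "%EXT%" entry then
        exts.foldl (fun st ext => pvAddA st (PySem.Str.replace entry "%EXT%" ext)) st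
      else
        let st := pvAddA st entry
        -- entry.split("/")[-1]: split? with a non-empty sep always returns some nonempty list
        if force_extensions && !(PySem.Str.isIn "." (((PySem.Str.split? entry "/").getD []).getLast!)) then
          exts.foldl (fun st ext => pvAddA st (entry ++ "." ++ ext)) st
        else st)
    (PySem.Set.empty, [])).2

-- ===== PORT B =====
-- Phase 1 of B: the raw candidates contributed by one wordlist entry.
def pvCandsB (exts : List String) (force_extensions : Bool) (raw : String) : List String :=
  let entry := PySem.Str.strip raw
  if (entry == "") || PySem.Str.startswith entry "#" then []
  else if PySem.Str.isIn "%EXT%" entry then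
    exts.map (fun e => PySem.Str.replace entry "%EXT%" e)
  else
    entry ::
      (if force_extensions && !(PySem.Str.isIn "." (((PySem.Str.split? entry "/").getD []).getLast!)) then
        exts.map (fun e => entry ++ "." ++ e)
      else [])

def pvDefaultExtsB : List String :=
  ["php", "html", "js", "json", "txt", "bak", "zip", "old", "asp", "aspx", "jsp"]

-- B's while loop: emit the head into `out`, filter all of its copies out of the pending list.
def pvNubLoop (out : List String) : List String → List String
  | [] => out
  | h :: t => pvNubLoop (out ++ [h]) (t.filter (fun x => x != h))
termination_by l => l.length
decreasing_by simpa using Nat.lt_succ_of_le (List.length_filter_le _ t)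

def build_dirb_wordlist_py_alt (wordlist : List String) (extensions : Option (List String)) (force_extensions : Bool) : List String :=
  -- `extensions or DEFAULT`: None and [] both fall back
  let exts := if (extensions.getD []).isEmpty then pvDefaultExtsB else extensions.getD []
  let cands := wordlist.flatMap (pvCandsB exts force_extensions)
  -- Phase 2: strip '/', drop empties, dedup by the filter-nub loop
  pvNubLoop [] ((cands.map (fun c => PySem.Str.stripChars c "/")).filter (fun s => s != ""))

-- ===== PRECONDITION & SPEC =====
def Spec_build_dirb_wordlist_py (wordlist : List String) (extensions : Option (List String)) (force_extensions : Bool) (out : List String) : Prop := out = build_dirb_wordlist_py_alt wordlist extensions force_extensions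
instance (wordlist : List String) (extensions : Option (List String)) (force_extensions : Bool) (out : List String) : Decidable (Spec_build_dirb_wordlist_py wordlist extensions force_extensions out) := by unfold Spec_build_dirb_wordlist_py; infer_instance

-- ===== CLAIM (what is proved, stated in full; the proofs are below) =====
def Claim_equal_build_dirb_wordlist_py : Prop := ∀ (wordlist : List String) (extensions : Option (List String)) (force_extensions : Bool), Dom_build_dirb_wordlist_py wordlist extensions force_extensions → Spec_build_dirb_wordlist_py wordlist extensions force_extensions (build_dirb_wordlist_py wordlist extensions force_extensions)

-- ===== LEMMAS AND PROOFS =====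

-- Invariant: along A's loop, `seen` and `out` are equal as lists, and both equal
-- folding Set.add over the stripped non-empty candidates seen so far.
def pvFold2 (s : PySem.Set String) (L : List String) : PySem.Set String :=
  ((L.map (fun c => PySem.Str.stripChars c "/")).filter (fun x => x != "")).foldl PySem.Set.add s

theorem pvAddA_diag (s : PySem.Set String) (p : String) :
    pvAddA (s, s) p = (pvFold2 s [p], pvFold2 s [p]) := by
  by_cases h : PySem.Str.stripChars p "/" = ""
  · simp [pvAddA, pvFold2, h, List.filter]
  · by_cases hc : PySem.Str.stripChars p "/" ∈ s
    · simp [pvAddA, pvFold2, h, hc, PySem.Set.add, List.filter]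
    · simp [pvAddA, pvFold2, h, hc, PySem.Set.add, List.filter]

theorem pvFold2_cons (s : PySem.Set String) (p : String) (L : List String) :
    pvFold2 s (p :: L) = pvFold2 (pvFold2 s [p]) L := by
  unfold pvFold2
  simp only [List.map, List.filter]
  by_cases h : (PySem.Str.stripChars p "/" != "") = true <;> simp [h, List.foldl]

theorem pvFoldlAddA (L : List String) (s : PySem.Set String) :
    L.foldl pvAddA (s, s) = (pvFold2 s L, pvFold2 s L) := by
  induction L generalizing s with
  | nil => rfl
  | cons p L ih => rw [List.foldl_cons, pvAddA_diag, ih, ← pvFold2_cons]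

theorem pvFold2_append (s : PySem.Set String) (L1 L2 : List String) :
    pvFold2 s (L1 ++ L2) = pvFold2 (pvFold2 s L1) L2 := by
  unfold pvFold2
  simp [List.filter_append, List.foldl_append]

theorem pvOuterFold (exts : List String) (force : Bool) (wl : List String) (s : PySem.Set String) :
    wl.foldl (fun st entry0 =>
      let entry := PySem.Str.strip entry0
      if (entry == "") || PySem.Str.startswith entry "#" then st
      else if PySem.Str.isIn "%EXT%" entry then
        exts.foldl (fun st ext => pvAddA st (PySem.Str.replace entry "%EXT%" ext)) st
      else
        let st := pvAddA st entry
        if force && !(PySem.Str.isIn "." (((PySem.Str.split? entry "/").getD []).getLast!)) then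
          exts.foldl (fun st ext => pvAddA st (entry ++ "." ++ ext)) st
        else st) (s, s)
    = (pvFold2 s (wl.flatMap (pvCandsB exts force)), pvFold2 s (wl.flatMap (pvCandsB exts force))) := by
  induction wl generalizing s with
  | nil => rfl
  | cons raw wl ih =>
    rw [List.foldl_cons, List.flatMap_cons, pvFold2_append]
    have hstep : (let entry := PySem.Str.strip raw
        if (entry == "") || PySem.Str.startswith entry "#" then (s, s)
        else if PySem.Str.isIn "%EXT%" entry then
          exts.foldl (fun st ext => pvAddA st (PySem.Str.replace entry "%EXT%" ext)) (s, s)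
        else
          let st := pvAddA (s, s) entry
          if force && !(PySem.Str.isIn "." (((PySem.Str.split? entry "/").getD []).getLast!)) then
            exts.foldl (fun st ext => pvAddA st (entry ++ "." ++ ext)) st
          else st)
        = (pvCandsB exts force raw).foldl pvAddA (s, s) := by
      simp only [pvCandsB]
      cases h1 : ((PySem.Str.strip raw == "") || PySem.Str.startswith (PySem.Str.strip raw) "#") with
      | true => simp [h1]
      | false =>
        simp only [h1, Bool.false_eq_true, if_false]
        cases h2 : PySem.Str.isIn "%EXT%" (PySem.Str.strip raw) with
        | true => simp [h2, List.foldl_map]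
        | false =>
          simp only [h2, Bool.false_eq_true, if_false, List.foldl_cons]
          cases h3 : (force && !(PySem.Str.isIn "." (((PySem.Str.split? (PySem.Str.strip raw) "/").getD []).getLast!))) with
          | true => simp [h3, List.foldl_map]
          | false => simp [h3]
    rw [hstep, pvFoldlAddA, ih]

-- Folding Set.add ignores elements already present (filtering them away changes nothing).
theorem pvFoldAdd_filter (l : List String) (s : PySem.Set String) (a : String) (ha : a ∈ s) :
    (l.filter (fun x => x != a)).foldl PySem.Set.add s = l.foldl PySem.Set.add s := by
  induction l generalizing s with
  | nil => rfl
  | cons h t ih =>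
    rw [List.filter_cons]
    by_cases hh : h = a
    · subst hh
      rw [if_neg (by simp), List.foldl_cons,
          show PySem.Set.add s h = s from by simp [PySem.Set.add, ha]]
      exact ih s ha
    · rw [if_pos (by simp [hh]), List.foldl_cons, List.foldl_cons]
      exact ih (PySem.Set.add s h) (by unfold PySem.Set.add; split <;> simp [ha])

-- B's filter-nub loop equals folding Set.add, given no pending element is already in `out`.
theorem pvNubLoop_eq_foldAdd (out l : List String) (hinv : ∀ x ∈ l, x ∉ out) :
    pvNubLoop out l = l.foldl PySem.Set.add out :=
  match l with
  | [] => by simp only [pvNubLoop, List.foldl_nil]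
  | h :: t => by
    have hrec := pvNubLoop_eq_foldAdd (out ++ [h]) (t.filter (fun x => x != h))
      (fun x hx => by
        simp only [List.mem_filter, bne_iff_ne] at hx
        simp [List.mem_append, hx.2, hinv x (List.mem_cons_of_mem _ hx.1)])
    rw [pvNubLoop, hrec, List.foldl_cons,
        show PySem.Set.add out h = out ++ [h] from by simp [PySem.Set.add, hinv h (by simp)],
        pvFoldAdd_filter t (out ++ [h]) h (by simp)]
termination_by l.length
decreasing_by simpa using Nat.lt_succ_of_le (List.length_filter_le _ t)

theorem pvNub_eq_dedup (l : List String) : pvNubLoop [] l = PySem.List.dedup l := by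
  rw [pvNubLoop_eq_foldAdd [] l (by simp), PySem.List.dedup_eq_ofList, PySem.Set.ofList_eq_foldl]

theorem build_dirb_wordlist_py_eq (wordlist : List String) (extensions : Option (List String)) (force_extensions : Bool) :
    build_dirb_wordlist_py wordlist extensions force_extensions
      = build_dirb_wordlist_py_alt wordlist extensions force_extensions := by
  have key : ∀ exts : List String,
      (wordlist.foldl (fun st entry0 =>
          let entry := PySem.Str.strip entry0
          if (entry == "") || PySem.Str.startswith entry "#" then st
          else if PySem.Str.isIn "%EXT%" entry then
            exts.foldl (fun st ext => pvAddA st (PySem.Str.replace entry "%EXT%" ext)) st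
          else
            let st := pvAddA st entry
            if force_extensions && !(PySem.Str.isIn "." (((PySem.Str.split? entry "/").getD []).getLast!)) then
              exts.foldl (fun st ext => pvAddA st (entry ++ "." ++ ext)) st
            else st)
        ((PySem.Set.empty : PySem.Set String), ([] : List String))).2
      = pvNubLoop [] (((wordlist.flatMap (pvCandsB exts force_extensions)).map
          (fun c => PySem.Str.stripChars c "/")).filter (fun s => s != "")) := by
    intro exts
    rw [pvNub_eq_dedup,
        show (PySem.Set.empty : PySem.Set String) = ([] : List String) from rfl, pvOuterFold,
        PySem.List.dedup_eq_ofList, PySem.Set.ofList_eq_foldl]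
    rfl
  rcases extensions with _ | (_ | ⟨e, es⟩)
  · exact key pvDefaultExts
  · exact key pvDefaultExts
  · exact key (e :: es)

-- ===== VERDICT (by name: the statement is the Claim_ definition above) =====
theorem build_dirb_wordlist_py_spec : Claim_equal_build_dirb_wordlist_py := by
  intro wl exts force _
  exact build_dirb_wordlist_py_eq wl exts force
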